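-- pv_equiv track=rewrite | github.com/MinKyeom/KMK-DREAM | Programmers/lv3/인사고과.py | solution
-- ===== SOURCE A (Python) =====
-- def solution(scores):
--     n = scores[0]
--     num = n[0] + n[1]
--
--     s = sorted(scores, key=lambda x: (-x[0], x[1]))
--
--     check = []
--
--     for i in range(len(s)):
--         if s[i][0] + s[i][1] > num:
--             if s[i][0] > n[0] and s[i][1] > n[1]:
--                 return -1
--
--             elif len(check) == 0:  # 첫번째의 경우 인센티브 못받을 경우x
--                 check.append([s[i][0], s[i][1]])
--                 v = s[i][1]
--                 w = s[i][0]
--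
--             else:
--                 if s[i][0] != w:  # 더 작아지는 순간
--                     if v > s[i][1]:  # 이전 첫번째 성과가 무조건 높기에 두번째는 그 이전보다 높아야 인센티브 가능!
--                         continue
--                     else:
--                         check.append([s[i][0], s[i][1]])
--                         v = s[i][1]
--                         w = s[i][0]
--                 else:
--                     check.append([s[i][0], s[i][1]])
--                     v = s[i][1]  # 첫번쨰가 같다면 두번쩨는 뒤로 갈수록 점수가 최소 높거나 같기때문에 갱신
--
--     return len(check) + 1
-- ===== SOURCE B (Python) =====
-- def solution(scores):
--     wanho = scores[0]
--     total = wanho[0] + wanho[1]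
--
--     def dominated(p):
--         return any(q[0] > p[0] and q[1] > p[1] for q in scores)
--
--     if dominated(wanho):
--         return -1
--     return sum(1 for p in scores
--                if p[0] + p[1] > total and not dominated(p)) + 1
-- ===== Notes on version B (the rewrite author's own statement) =====
-- stated objective: simpler
-- what changed: A sorts by (-score1, score2) and runs a stateful sweep with mutable v/w trackers to detect dominated employees; B drops the sort and state entirely and counts, by direct definition, the employees whose sum exceeds Wanho's and who are not strictly dominated in both scores by anyone (returning -1 if Wanho himself is dominated).
import Mathlib
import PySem

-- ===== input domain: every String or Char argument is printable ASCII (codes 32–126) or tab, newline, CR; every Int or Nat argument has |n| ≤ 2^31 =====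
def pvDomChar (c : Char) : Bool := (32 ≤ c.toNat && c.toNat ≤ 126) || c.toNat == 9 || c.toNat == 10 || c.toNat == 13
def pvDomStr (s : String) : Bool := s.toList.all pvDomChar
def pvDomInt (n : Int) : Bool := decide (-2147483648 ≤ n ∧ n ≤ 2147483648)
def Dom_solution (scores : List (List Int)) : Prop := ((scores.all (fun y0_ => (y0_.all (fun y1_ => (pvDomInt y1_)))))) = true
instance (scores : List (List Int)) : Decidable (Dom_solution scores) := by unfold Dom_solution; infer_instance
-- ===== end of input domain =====

-- B replaces A's sort + stateful sweep (mutable v/w trackers) by the direct definition: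
-- count employees with sum > Wanho's that nobody strictly dominates in both scores (-1 if Wanho is dominated).
-- Neither implementation mutates its argument.

-- ===== PORT A =====
-- row accessors p[0], p[1] (shared by both ports; rows have length ≥ 2 under Pre_)
def pX (p : List Int) : Int := PySem.List.pyGetD p 0 0
def pY (p : List Int) : Int := PySem.List.pyGetD p 1 0

-- the for-loop of A: state = (check, v, w); early return -1 inside
def solGoA (n0 n1 num : Int) : List (List Int) → List (List Int) → Int → Int → Int
  | [], check, _, _ => (check.length : Int) + 1
  | p :: rest, check, v, w =>
    if pX p + pY p > num then
      if pX p > n0 ∧ pY p > n1 then -1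
      else if check.length = 0 then
        solGoA n0 n1 num rest (check ++ [[pX p, pY p]]) (pY p) (pX p)
      else if pX p ≠ w then
        if v > pY p then solGoA n0 n1 num rest check v w
        else solGoA n0 n1 num rest (check ++ [[pX p, pY p]]) (pY p) (pX p)
      else solGoA n0 n1 num rest (check ++ [[pX p, pY p]]) (pY p) w
    else solGoA n0 n1 num rest check v w

def solution (scores : List (List Int)) : Int :=
  let n := PySem.List.pyGetD scores 0 []
  let num := pX n + pY n
  let s := PySem.List.sorted2 scores (fun x => -(pX x)) (fun x => pY x)
  solGoA (pX n) (pY n) num s [] 0 0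

-- ===== PORT B =====
-- dominated(p): some employee beats p strictly in both scores
def solDominated (scores : List (List Int)) (p : List Int) : Bool :=
  scores.any (fun q => decide (pX q > pX p ∧ pY q > pY p))

-- the counted predicate of B's generator expression
def solKeep (scores : List (List Int)) (total : Int) (p : List Int) : Bool :=
  decide (pX p + pY p > total) && !solDominated scores p

def solution_alt (scores : List (List Int)) : Int :=
  let wanho := PySem.List.pyGetD scores 0 []
  let total := pX wanho + pY wanho
  if solDominated scores wanho then -1
  else (scores.countP (solKeep scores total) : Int) + 1

-- ===== PRECONDITION & SPEC =====
-- Pre_ excludes exactly the inputs where the Python A raises IndexError: an empty list, or a row with fewer than two entries.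
def Pre_solution (scores : List (List Int)) : Prop :=
  scores ≠ [] ∧ ∀ r ∈ scores, 2 ≤ r.length
instance (scores : List (List Int)) : Decidable (Pre_solution scores) := by unfold Pre_solution; infer_instance

def pvWitness_solution : List (List Int) := [[2, 2], [1, 4], [3, 2]]

def Spec_solution (scores : List (List Int)) (out : Int) : Prop := out = solution_alt scores
instance (scores : List (List Int)) (out : Int) : Decidable (Spec_solution scores out) := by unfold Spec_solution; infer_instance

-- ===== CLAIM (what is proved, stated in full; the proofs are below) =====
def Claim_equal_solution : Prop := ∀ (scores : List (List Int)), Dom_solution scores → Pre_solution scores → Spec_solution scores (solution scores)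

-- ===== LEMMAS AND PROOFS =====

-- the sort order of A: strictly larger first score, or equal first score and ≤ second score
def sortR (a b : List Int) : Prop := pX a > pX b ∨ (pX a = pX b ∧ pY a ≤ pY b)

-- unfolding B's counted predicate
lemma keep_iff (scores : List (List Int)) (t : Int) (x : List Int) :
    solKeep scores t x = true ↔
      (pX x + pY x > t ∧ ∀ q ∈ scores, ¬(pX q > pX x ∧ pY q > pY x)) := by
  simp [solKeep, solDominated]

-- A's tuple-key sort is the sort by the lexicographic key (-p[0], p[1])
lemma sorted2_eq_sorted_lex (xs : List (List Int)) :
    PySem.List.sorted2 xs (fun x => -(pX x)) (fun x => pY x)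
      = PySem.List.sorted xs (fun x => (toLex (-(pX x), pY x) : Int ×ₗ Int)) := by
  have hb : (fun a b : List Int =>
        decide (-(pX a) < -(pX b)) || (!decide (-(pX b) < -(pX a)) && decide (pY a < pY b)))
      = (fun a b : List Int =>
        decide ((toLex (-(pX a), pY a) : Int ×ₗ Int) < toLex (-(pX b), pY b))) := by
    funext a b
    by_cases h1 : -(pX a) < -(pX b) <;> by_cases h2 : -(pX b) < -(pX a) <;>
      by_cases h3 : pY a < pY b <;>
      simp [h1, h2, h3, Prod.Lex.lt_iff] <;> omega
  simp only [PySem.List.sorted2, PySem.List.sorted, Bool.false_eq_true, if_false, hb]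

lemma pairwise_sorted2 (xs : List (List Int)) :
    List.Pairwise sortR (PySem.List.sorted2 xs (fun x => -(pX x)) (fun x => pY x)) := by
  rw [sorted2_eq_sorted_lex]
  have h := PySem.List.sorted_pairwise xs (fun x => (toLex (-(pX x), pY x) : Int ×ₗ Int))
  refine h.imp ?_
  intro a b hab
  have hab' := Prod.Lex.le_iff.mp hab
  simp only [ofLex_toLex] at hab'
  rcases hab' with h1 | ⟨h1, h2⟩
  · exact Or.inl (by simp at h1; omega)
  · exact Or.inr ⟨by simp at h1; omega, by simpa using h2⟩

-- any strict dominator of an element lying before the rest of the sorted list sits in the processed prefix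
lemma dom_mem_pre (scores pre rest : List (List Int)) (p q : List Int)
    (hperm : (pre ++ p :: rest).Perm scores)
    (hpw : List.Pairwise sortR (pre ++ p :: rest))
    (hq : q ∈ scores) (hd : pX q > pX p ∧ pY q > pY p) : q ∈ pre := by
  have hmem : q ∈ pre ++ p :: rest := (hperm.mem_iff).mpr hq
  rcases List.mem_append.mp hmem with h | h
  · exact h
  · rcases List.mem_cons.mp h with rfl | h
    · omega
    · have := (List.pairwise_cons.mp (List.pairwise_append.mp hpw).2.1).1 q h
      rcases this with h' | ⟨h', _⟩ <;> omega

-- A's loop returns -1 as soon as a strict dominator of Wanho remains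
lemma goA_dom (n0 n1 : Int) :
    ∀ (rest : List (List Int)), (∃ q ∈ rest, pX q > n0 ∧ pY q > n1) →
    ∀ (check : List (List Int)) (v w : Int),
      solGoA n0 n1 (n0 + n1) rest check v w = -1 := by
  intro rest
  induction rest with
  | nil => rintro ⟨q, hq, _⟩ _ _ _; cases hq
  | cons p rest ih =>
    rintro ⟨q, hq, hd⟩ check v w
    by_cases hp : pX p > n0 ∧ pY p > n1
    · have hsum : pX p + pY p > n0 + n1 := by omega
      simp only [solGoA, if_pos hsum, if_pos hp]
    · have hqr : q ∈ rest := by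
        rcases List.mem_cons.mp hq with rfl | h
        · exact absurd hd hp
        · exact h
      have hrec := fun c v w => ih ⟨q, hqr, hd⟩ c v w
      simp only [solGoA]
      split_ifs <;> first | rfl | exact hrec _ _ _

-- main loop invariant: with no dominator of Wanho anywhere, A's sweep counts exactly B's kept employees
lemma goA_of_no_dom (scores : List (List Int)) (n0 n1 : Int)
    (hnd : ∀ q ∈ scores, ¬(pX q > n0 ∧ pY q > n1)) :
    ∀ (rest pre check : List (List Int)) (v w : Int),
      (pre ++ rest).Perm scores →
      List.Pairwise sortR (pre ++ rest) →
      check.length = pre.countP (solKeep scores (n0 + n1)) →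
      ((check = [] ∧ ∀ q ∈ pre, ¬(pX q + pY q > n0 + n1)) ∨
       ((∃ r ∈ pre, solKeep scores (n0 + n1) r = true ∧ pX r = w ∧ pY r = v) ∧
        ∀ q ∈ pre, pX q + pY q > n0 + n1 → pY q ≤ v)) →
      solGoA n0 n1 (n0 + n1) rest check v w
        = (check.length : Int) + (rest.countP (solKeep scores (n0 + n1)) : Int) + 1 := by
  intro rest
  induction rest with
  | nil =>
    intro pre check v w _ _ _ _
    simp [solGoA]
  | cons p rest ih =>
    intro pre check v w hperm hpw hlen hinv
    have hperm' : ((pre ++ [p]) ++ rest).Perm scores := by simpa using hperm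
    have hpw' : List.Pairwise sortR ((pre ++ [p]) ++ rest) := by simpa using hpw
    have hpmem : p ∈ scores := hperm.subset (by simp)
    have hpreR : ∀ r ∈ pre, sortR r p :=
      fun r hr => (List.pairwise_append.mp hpw).2.2 r hr p (by simp)
    have hdomC : ∀ q ∈ scores, (pX q > pX p ∧ pY q > pY p) → q ∈ pre :=
      fun q hq hd => dom_mem_pre scores pre rest p q hperm hpw hq hd
    by_cases hsum : pX p + pY p > n0 + n1
    · have hp1 : ¬(pX p > n0 ∧ pY p > n1) := hnd p hpmem
      rcases hinv with ⟨hck, hpre0⟩ | ⟨⟨r, hrmem, hrkeep, hrx, hry⟩, hvmax⟩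
      · -- first kept element
        subst hck
        have hnodom : ∀ q ∈ scores, ¬(pX q > pX p ∧ pY q > pY p) := by
          intro q hq hd
          exact hpre0 q (hdomC q hq hd) (by omega)
        have hkp : solKeep scores (n0 + n1) p = true :=
          (keep_iff scores _ p).mpr ⟨hsum, hnodom⟩
        have hstep := ih (pre ++ [p]) ([] ++ [[pX p, pY p]]) (pY p) (pX p) hperm' hpw'
          (by
            simp [List.countP_append, hkp]
            intro a ha
            simpa using List.countP_eq_zero.mp hlen.symm a ha)
          (Or.inr ⟨⟨p, by simp, hkp, rfl, rfl⟩, by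
            intro q hq hsq
            rcases List.mem_append.mp hq with h | h
            · exact absurd hsq (hpre0 q h)
            · simp at h; subst h; omega⟩)
        simp only [solGoA, if_pos hsum, if_neg hp1, List.length_nil]
        rw [hstep]
        simp [hkp]
        omega
      · -- check nonempty
        have hck0 : ¬ check.length = 0 := by
          have : 0 < pre.countP (solKeep scores (n0 + n1)) :=
            List.countP_pos_iff.mpr ⟨r, hrmem, hrkeep⟩
          omega
        have hrsum : pX r + pY r > n0 + n1 := ((keep_iff scores _ r).mp hrkeep).1
        have hrnodom : ∀ q ∈ scores, ¬(pX q > pX r ∧ pY q > pY r) :=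
          ((keep_iff scores _ r).mp hrkeep).2
        have hrscores : r ∈ scores := hperm.subset (List.mem_append.mpr (Or.inl hrmem))
        have hrRp : sortR r p := hpreR r hrmem
        have hdom_iff : (∃ q ∈ scores, pX q > pX p ∧ pY q > pY p) ↔ (pX p ≠ w ∧ v > pY p) := by
          constructor
          · rintro ⟨q, hq, hd⟩
            have hqpre := hdomC q hq hd
            have hqv : pY q ≤ v := hvmax q hqpre (by omega)
            have hvp : v > pY p := by omega
            refine ⟨?_, hvp⟩
            intro hxw
            rcases hrRp with h | ⟨h1, h2⟩ <;> omega
          · rintro ⟨hxw, hvp⟩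
            refine ⟨r, hrscores, ?_, by omega⟩
            rcases hrRp with h | ⟨h1, h2⟩ <;> omega
        by_cases hxw : pX p ≠ w
        · by_cases hvp : v > pY p
          · -- skipped: p is dominated
            have hkp : solKeep scores (n0 + n1) p = false := by
              rw [Bool.eq_false_iff, Ne, keep_iff]
              rintro ⟨_, hall⟩
              obtain ⟨q, hq, hd⟩ := hdom_iff.mpr ⟨hxw, hvp⟩
              exact hall q hq hd
            have hstep := ih (pre ++ [p]) check v w hperm' hpw'
              (by simp [List.countP_append, hkp, hlen])
              (Or.inr ⟨⟨r, by simp [hrmem], hrkeep, hrx, hry⟩, by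
                intro q hq hsq
                rcases List.mem_append.mp hq with h | h
                · exact hvmax q h hsq
                · simp at h; subst h; omega⟩)
            simp only [solGoA, if_pos hsum, if_neg hp1, if_neg hck0, if_pos hxw, if_pos hvp]
            rw [hstep]
            simp [hkp]
          · -- kept, new first score
            have hnodom : ∀ q ∈ scores, ¬(pX q > pX p ∧ pY q > pY p) := by
              intro q hq hd
              exact hvp (hdom_iff.mp ⟨q, hq, hd⟩).2
            have hkp : solKeep scores (n0 + n1) p = true :=
              (keep_iff scores _ p).mpr ⟨hsum, hnodom⟩
            have hstep := ih (pre ++ [p]) (check ++ [[pX p, pY p]]) (pY p) (pX p) hperm' hpw'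
              (by simp [List.countP_append, hkp, hlen])
              (Or.inr ⟨⟨p, by simp, hkp, rfl, rfl⟩, by
                intro q hq hsq
                rcases List.mem_append.mp hq with h | h
                · have := hvmax q h hsq; omega
                · simp at h; subst h; omega⟩)
            simp only [solGoA, if_pos hsum, if_neg hp1, if_neg hck0, if_pos hxw, if_neg hvp]
            rw [hstep]
            simp [hkp]
            omega
        · -- same first score as the last kept element: kept
          have hxw' : pX p = w := by omega
          have hvle : v ≤ pY p := by
            rcases hrRp with h | ⟨h1, h2⟩ <;> omega
          have hnodom : ∀ q ∈ scores, ¬(pX q > pX p ∧ pY q > pY p) := by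
            intro q hq hd
            exact hxw (hdom_iff.mp ⟨q, hq, hd⟩).1
          have hkp : solKeep scores (n0 + n1) p = true :=
            (keep_iff scores _ p).mpr ⟨hsum, hnodom⟩
          have hstep := ih (pre ++ [p]) (check ++ [[pX p, pY p]]) (pY p) w hperm' hpw'
            (by simp [List.countP_append, hkp, hlen])
            (Or.inr ⟨⟨p, by simp, hkp, hxw', rfl⟩, by
              intro q hq hsq
              rcases List.mem_append.mp hq with h | h
              · have := hvmax q h hsq; omega
              · simp at h; subst h; omega⟩)
          simp only [solGoA, if_pos hsum, if_neg hp1, if_neg hck0, if_neg hxw]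
          rw [hstep]
          simp [hkp]
          omega
    · -- sum too small: not counted, state unchanged
      have hkp : solKeep scores (n0 + n1) p = false := by
        rw [Bool.eq_false_iff, Ne, keep_iff]
        rintro ⟨h, _⟩; exact hsum h
      have hinv' : (check = [] ∧ ∀ q ∈ pre ++ [p], ¬(pX q + pY q > n0 + n1)) ∨
          ((∃ r ∈ pre ++ [p], solKeep scores (n0 + n1) r = true ∧ pX r = w ∧ pY r = v) ∧
           ∀ q ∈ pre ++ [p], pX q + pY q > n0 + n1 → pY q ≤ v) := by
        rcases hinv with ⟨hck, hpre0⟩ | ⟨⟨r, hrmem, hrkeep, hrx, hry⟩, hvmax⟩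
        · refine Or.inl ⟨hck, ?_⟩
          intro q hq
          rcases List.mem_append.mp hq with h | h
          · exact hpre0 q h
          · simp at h; subst h; exact hsum
        · refine Or.inr ⟨⟨r, by simp [hrmem], hrkeep, hrx, hry⟩, ?_⟩
          intro q hq hsq
          rcases List.mem_append.mp hq with h | h
          · exact hvmax q h hsq
          · simp at h; subst h; exact absurd hsq hsum
      have hstep := ih (pre ++ [p]) check v w hperm' hpw'
        (by simp [List.countP_append, hkp, hlen]) hinv'
      simp only [solGoA, if_neg hsum]
      rw [hstep]
      simp [hkp]

-- ===== VERDICT (by name: the statement is the Claim_ definition above) =====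
theorem solution_spec : Claim_equal_solution := by
  intro scores _ _
  unfold Spec_solution solution solution_alt
  set n := PySem.List.pyGetD scores 0 [] with hn
  by_cases hd : solDominated scores n = true
  · rw [if_pos hd]
    have hex : ∃ q ∈ scores, pX q > pX n ∧ pY q > pY n := by
      simpa [solDominated, List.any_eq_true] using hd
    obtain ⟨q, hq, hdq⟩ := hex
    have hqs : q ∈ PySem.List.sorted2 scores (fun x => -(pX x)) (fun x => pY x) :=
      ((PySem.List.sorted2_perm scores _ _ false).mem_iff).mpr hq
    exact goA_dom (pX n) (pY n) _ ⟨q, hqs, hdq⟩ [] 0 0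
  · rw [if_neg hd]
    have hnd : ∀ q ∈ scores, ¬(pX q > pX n ∧ pY q > pY n) := by
      intro q hq
      simp only [solDominated, List.any_eq_true] at hd
      exact fun h => hd ⟨q, hq, by simpa using h⟩
    have hperm := PySem.List.sorted2_perm scores (fun x => -(pX x)) (fun x => pY x) false
    have h := goA_of_no_dom scores (pX n) (pY n) hnd
      (PySem.List.sorted2 scores (fun x => -(pX x)) (fun x => pY x)) [] [] 0 0
      (by simpa using hperm) (by simpa using pairwise_sorted2 scores) rfl
      (Or.inl ⟨rfl, by simp⟩)
    rw [h, hperm.countP_eq]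
    simp
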